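-- pv_equiv track=rewrite | github.com/sai-kanchapu/codemind-python | happy_number.py | ad
-- ===== SOURCE A (Python) =====
-- def ad(n):
--     sum = 0
--     while n>0:
--         r = n%10
--         sum = sum+r**2
--         n = n//10
--     if sum>9:
--         sum = ad(sum)
--     return sum
-- ===== SOURCE B (Python) =====
-- def ad(n):
--     # build the list of decimal digits once, sum squares over it; iterate until single digit
--     def digits(m):
--         ds = []
--         while m > 0:
--             ds.append(m % 10)
--             m //= 10
--         return ds
--     s = sum(d * d for d in digits(n))
--     while s > 9:
--         s = sum(d * d for d in digits(s))
--     return s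
-- ===== Notes on version B (the rewrite author's own statement) =====
-- stated objective: idiomatic
-- what changed: A fuses digit extraction, squaring and accumulation inside one recursive function; B separates concerns: a digits() helper materialises the list of decimal digits, sum(d*d for d in ...) folds over it, and an explicit outer while-loop replaces A's tail recursion.
import Mathlib
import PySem

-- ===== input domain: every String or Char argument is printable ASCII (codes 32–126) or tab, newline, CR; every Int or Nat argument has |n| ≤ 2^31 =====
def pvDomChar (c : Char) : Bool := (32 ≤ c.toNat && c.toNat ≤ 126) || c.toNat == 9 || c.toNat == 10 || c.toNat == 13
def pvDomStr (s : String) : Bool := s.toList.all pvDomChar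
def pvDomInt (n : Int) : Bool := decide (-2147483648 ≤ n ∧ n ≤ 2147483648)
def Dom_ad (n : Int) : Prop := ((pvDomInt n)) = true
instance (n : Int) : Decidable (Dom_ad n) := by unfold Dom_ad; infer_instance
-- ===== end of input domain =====

-- B splits A's fused recursive loop into a digit-list builder plus a sum-of-squares fold,
-- and replaces A's tail recursion with an explicit iterative while-loop (same values).
-- Both ports use a fuel counter only to make the self-application loop total; within the
-- domain the fuel is never exhausted (reduction reaches a single digit in far fewer steps).

-- ===== PORT A =====
-- the 'while n>0' digit-square-sum loop of A, state (n, sum)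
def adDigitLoop (n : Int) (sum : Int) : Int :=
  if h : n > 0 then
    adDigitLoop (PySem.Int.floordiv n 10) (sum + (PySem.Int.mod n 10) ^ 2)
  else sum
termination_by n.toNat
decreasing_by
  have : PySem.Int.floordiv n 10 = n / 10 := PySem.Int.floordiv_eq_ediv_of_pos (by omega)
  rw [this]; omega

-- A's recursion 'if sum>9: sum = ad(sum)', fuel-guarded to be total
def adRec : Nat → Int → Int
  | 0, n => adDigitLoop n 0
  | f + 1, n =>
    let sum := adDigitLoop n 0
    if sum > 9 then adRec f sum else sum

def ad (n : Int) : Int := adRec 1000 n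

-- ===== PORT B =====
-- B's digits() helper: the list of decimal digits, least significant first
def adDigits (m : Int) : List Int :=
  if _h : m > 0 then PySem.Int.mod m 10 :: adDigits (PySem.Int.floordiv m 10) else []
termination_by m.toNat
decreasing_by
  have : PySem.Int.floordiv m 10 = m / 10 := PySem.Int.floordiv_eq_ediv_of_pos (by omega)
  rw [this]; omega

-- B's sum(d*d for d in ds)
def adSqSum (ds : List Int) : Int := ds.foldl (fun a d => a + d * d) 0

-- B's outer 'while s>9' loop, fuel-guarded to be total
def adReduce : Nat → Int → Int
  | 0, s => s
  | f + 1, s => if s > 9 then adReduce f (adSqSum (adDigits s)) else s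

def ad_alt (n : Int) : Int := adReduce 1000 (adSqSum (adDigits n))

-- ===== PRECONDITION & SPEC =====
def Spec_ad (n : Int) (out : Int) : Prop := out = ad_alt n
instance (n : Int) (out : Int) : Decidable (Spec_ad n out) := by unfold Spec_ad; infer_instance

-- ===== CLAIM (what is proved, stated in full; the proofs are below) =====
def Claim_equal_ad : Prop := ∀ (n : Int), Dom_ad n → Spec_ad n (ad n)

-- ===== LEMMAS AND PROOFS =====

theorem foldl_adDigits (n s : Int) :
    (adDigits n).foldl (fun a d => a + d * d) s = adDigitLoop n s := by
  by_cases h : n > 0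
  · rw [adDigits, adDigitLoop]
    simp only [h, dif_pos, List.foldl_cons]
    have hlt : PySem.Int.floordiv n 10 = n / 10 := PySem.Int.floordiv_eq_ediv_of_pos (by omega)
    have hsq : (PySem.Int.mod n 10) ^ 2 = PySem.Int.mod n 10 * PySem.Int.mod n 10 := sq _
    rw [hsq]
    exact foldl_adDigits _ _
  · rw [adDigits, adDigitLoop]; simp [h]
termination_by n.toNat
decreasing_by
  rw [hlt]; omega

theorem adSqSum_eq (n : Int) : adSqSum (adDigits n) = adDigitLoop n 0 :=
  foldl_adDigits n 0

theorem adRec_eq_adReduce (f : Nat) (n : Int) :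
    adRec f n = adReduce f (adSqSum (adDigits n)) := by
  induction f generalizing n with
  | zero => simp [adRec, adReduce, adSqSum_eq]
  | succ f ih =>
    simp only [adRec, adReduce, adSqSum_eq]
    split_ifs with h
    · rw [ih, adSqSum_eq]
    · rfl

-- ===== VERDICT (by name: the statement is the Claim_ definition above) =====
theorem ad_spec : Claim_equal_ad := by
  intro n _
  unfold Spec_ad ad ad_alt
  exact adRec_eq_adReduce 1000 n
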